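-- pv_equiv track=rewrite | github.com/abc20210708/python_study | greedy/ex/Q06.py | solution
-- ===== SOURCE A (Python) =====
-- import heapq
-- import heapq
--
-- def solution(food_times, K):
--     answer = -1
--     food = []
--     for i in range(len(food_times)):
--         heapq.heappush(food, (food_times[i], i+1))
--
--     prev = 0
--     l = len(food)
--     while food:
--         temp = (food[0][0] - prev) * l
--         if K >= temp:
--             K -= temp
--             prev, _ = heapq.heappop(food)
--             l -= 1
--         else:
--             index = K % l
--             food.sort(key=lambda x: x[1])
--             answer = food[index][1]
--             break
--
--     return answer
-- ===== SOURCE B (Python) =====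
-- def solution(food_times, K):
--     # Binary search on the per-food threshold v instead of simulating rounds:
--     # spent(v) = sum(min(f, v)) is the total time after every food has been
--     # eaten for at most v seconds; find the largest v with spent(v) <= K and
--     # pick the (K - spent(v))-th still-uneaten food in original order.
--     if not food_times:
--         return -1
--     n = len(food_times)
--     if K >= sum(food_times):
--         return -1
--     lo = min(min(food_times), K // n)   # spent(lo) = n*lo <= K
--     hi = max(food_times)                # spent(hi) = sum(food_times) > K
--     while lo + 1 < hi:
--         mid = (lo + hi) // 2
--         if sum(min(f, mid) for f in food_times) <= K:
--             lo = mid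
--         else:
--             hi = mid
--     v = lo
--     rem = K - sum(min(f, v) for f in food_times)
--     for i, f in enumerate(food_times):
--         if f > v:
--             if rem == 0:
--                 return i + 1
--             rem -= 1
--     return -1  # unreachable: 0 <= rem < number of foods with f > v
-- ===== Notes on version B (the rewrite author's own statement) =====
-- stated objective: alternative
-- what changed: Replaces the heap simulation of eating rounds by a binary search on the per-food threshold v with spent(v)=sum(min(f,v)): the largest v with spent(v)<=K determines the surviving foods, and the answer is the (K-spent(v))-th survivor scanned in original order, with no heap, no sort and no modulo.
import Mathlib
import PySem

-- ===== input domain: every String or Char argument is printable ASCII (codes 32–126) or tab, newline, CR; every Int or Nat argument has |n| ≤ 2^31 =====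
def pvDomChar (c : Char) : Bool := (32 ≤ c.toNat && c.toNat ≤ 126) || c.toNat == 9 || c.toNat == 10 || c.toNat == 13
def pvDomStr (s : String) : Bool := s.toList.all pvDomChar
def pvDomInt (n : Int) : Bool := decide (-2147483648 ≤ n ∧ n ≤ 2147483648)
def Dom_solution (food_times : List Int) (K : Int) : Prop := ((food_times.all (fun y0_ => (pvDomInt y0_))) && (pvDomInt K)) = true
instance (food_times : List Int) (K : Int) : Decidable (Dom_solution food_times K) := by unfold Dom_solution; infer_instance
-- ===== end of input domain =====

-- B replaces A's heap simulation of eating rounds by a binary search on the per-food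
-- time threshold v (spent(v) = Σ min(f, v)) followed by one scan in original order
-- (objective: alternative algorithm, no heap, no sort, no modulo).

-- ===== PORT A =====
-- Python's '<' on (int, int) tuples is lexicographic; pvLt models it exactly.
def pvLt (a b : Int × Int) : Bool := decide (a.1 < b.1) || (decide (a.1 = b.1) && decide (a.2 < b.2))

def pvHget (h : List (Int × Int)) (i : Nat) : Int × Int := h.getD i (0, 0)

-- exact port of CPython heapq._siftdown(heap, 0, pos) (newitem = heap[pos] passed explicitly);
-- fuel = pos bounds the parent chain, a pure totality guard (the parent index (pos-1)/2 < pos)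
def pvSiftdownGo : Nat → List (Int × Int) → Int × Int → Nat → List (Int × Int)
  | 0, h, newitem, pos => h.set pos newitem
  | fuel + 1, h, newitem, pos =>
    if 0 < pos then
      if pvLt newitem (pvHget h ((pos - 1) / 2)) then
        pvSiftdownGo fuel (h.set pos (pvHget h ((pos - 1) / 2))) newitem ((pos - 1) / 2)
      else h.set pos newitem
    else h.set pos newitem

def pvSiftdown (h : List (Int × Int)) (newitem : Int × Int) (pos : Nat) : List (Int × Int) :=
  pvSiftdownGo pos h newitem pos

-- exact port of CPython heapq._siftup(heap, pos) with pos = startpos = 0 case generalised: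
-- move the hole down to a leaf choosing the smaller child, then sift newitem up.
-- fuel = h.length - pos bounds the walk to a leaf, a pure totality guard
def pvSiftupGo : Nat → List (Int × Int) → Int × Int → Nat → List (Int × Int)
  | 0, h, newitem, pos => pvSiftdown (h.set pos newitem) newitem pos
  | fuel + 1, h, newitem, pos =>
    if 2 * pos + 1 < h.length then
      if 2 * pos + 2 < h.length ∧ pvLt (pvHget h (2 * pos + 1)) (pvHget h (2 * pos + 2)) = false then
        pvSiftupGo fuel (h.set pos (pvHget h (2 * pos + 2))) newitem (2 * pos + 2)
      else
        pvSiftupGo fuel (h.set pos (pvHget h (2 * pos + 1))) newitem (2 * pos + 1)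
    else pvSiftdown (h.set pos newitem) newitem pos

def pvSiftup (h : List (Int × Int)) (newitem : Int × Int) (pos : Nat) : List (Int × Int) :=
  pvSiftupGo (h.length - pos) h newitem pos

-- heapq.heappush
def pvHeappush (h : List (Int × Int)) (item : Int × Int) : List (Int × Int) :=
  pvSiftdown (h ++ [item]) item h.length

-- heapq.heappop (returns (popped item, remaining heap))
def pvHeappop (h : List (Int × Int)) : (Int × Int) × List (Int × Int) :=
  let lastelt := pvHget h (h.length - 1)
  let h1 := h.dropLast
  if h1.isEmpty then (lastelt, h1)
  else (pvHget h1 0, pvSiftup (h1.set 0 lastelt) lastelt 0)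

-- A's while loop; fuel = h.length bounds the iteration count (each pop shortens the heap), a pure totality guard
def pvLoopAGo : Nat → List (Int × Int) → Int → Int → Int → Int → Int
  | 0, _, _, _, _, answer => answer
  | fuel + 1, h, prev, K, l, answer =>
    if h.isEmpty then answer
    else
      if K ≥ ((pvHget h 0).1 - prev) * l then
        pvLoopAGo fuel (pvHeappop h).2 (pvHeappop h).1.1 (K - ((pvHget h 0).1 - prev) * l) (l - 1) answer
      else
        (PySem.List.pyGetD (PySem.List.sorted h (fun x => x.2) false)
          (PySem.Int.mod K l) ((0 : Int), (0 : Int))).2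

def pvLoopA (h : List (Int × Int)) (prev K l answer : Int) : Int :=
  pvLoopAGo h.length h prev K l answer

-- the heap-building for-loop of A
def pvBuild (food_times : List Int) : List (Int × Int) :=
  (PySem.List.pyRange 0 (food_times.length : Int) 1).foldl
    (fun h i => pvHeappush h (PySem.List.pyGetD food_times i 0, i + 1)) []

def solution (food_times : List Int) (K : Int) : Int :=
  pvLoopA (pvBuild food_times) 0 K ((pvBuild food_times).length : Int) (-1)

-- ===== PORT B =====
-- sum(min(f, v) for f in food_times)
def pvSumMin (food_times : List Int) (v : Int) : Int :=
  (food_times.map (fun f => min f v)).sum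

-- the binary-search while loop of B; fuel = (hi - lo).toNat bounds the iteration count
-- (each step at least halves hi - lo), a pure totality guard
def pvBsearchGo : Nat → List Int → Int → Int → Int → Int
  | 0, _, _, lo, _ => lo
  | fuel + 1, food_times, K, lo, hi =>
    if lo + 1 < hi then
      if pvSumMin food_times (PySem.Int.floordiv (lo + hi) 2) ≤ K then
        pvBsearchGo fuel food_times K (PySem.Int.floordiv (lo + hi) 2) hi
      else
        pvBsearchGo fuel food_times K lo (PySem.Int.floordiv (lo + hi) 2)
    else lo

def pvBsearch (food_times : List Int) (K lo hi : Int) : Int :=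
  pvBsearchGo (hi - lo).toNat food_times K lo hi

-- the final 'for i, f in enumerate(food_times)' scan of B (the [] case is Python's
-- fall-through after the loop, unreachable when the scan is invoked by solution_alt)
def pvScan : List Int → Int → Int → Int → Int
  | [], _, _, _ => -1
  | f :: rest, i, v, rem =>
    if v < f then
      if rem = 0 then i + 1 else pvScan rest (i + 1) v (rem - 1)
    else pvScan rest (i + 1) v rem

def solution_alt (food_times : List Int) (K : Int) : Int :=
  if food_times.isEmpty then -1
  else if K ≥ food_times.sum then -1
  else
    let n : Int := (food_times.length : Int)
    let lo := min ((PySem.List.min? food_times (fun y => y)).getD 0) (PySem.Int.floordiv K n)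
    let hi := (PySem.List.max? food_times (fun y => y)).getD 0
    let v := pvBsearch food_times K lo hi
    pvScan food_times 0 v (K - pvSumMin food_times v)

-- ===== PRECONDITION & SPEC =====
def Spec_solution (food_times : List Int) (K : Int) (out : Int) : Prop := out = solution_alt food_times K
instance (food_times : List Int) (K : Int) (out : Int) : Decidable (Spec_solution food_times K out) := by unfold Spec_solution; infer_instance

-- ===== CLAIM (what is proved, stated in full; the proofs are below) =====
def Claim_equal_solution : Prop := ∀ (food_times : List Int) (K : Int), Dom_solution food_times K → Spec_solution food_times K (solution food_times K)

-- ===== LEMMAS AND PROOFS =====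

-- proof-side intermediate: A's eating loop rephrased over the sorted pair list
def pvLoopB : List (Int × Int) → Int → Int → Int
  | [], _, _ => -1
  | f :: rest, prev, K =>
    if K ≥ (f.1 - prev) * ((f :: rest).length : Int) then
      pvLoopB rest f.1 (K - (f.1 - prev) * ((f :: rest).length : Int))
    else
      (PySem.List.pyGetD (PySem.List.sorted (f :: rest) (fun x => x.2) false)
        (PySem.Int.mod K ((f :: rest).length : Int)) ((0 : Int), (0 : Int))).2

theorem pvSiftdownGo_length : ∀ (fuel : Nat) (h : List (Int × Int)) (x : Int × Int) (pos : Nat),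
    (pvSiftdownGo fuel h x pos).length = h.length
  | 0, h, x, pos => by simp [pvSiftdownGo]
  | fuel + 1, h, x, pos => by
    rw [pvSiftdownGo]
    split
    · split
      · rw [pvSiftdownGo_length]; simp
      · simp
    · simp

theorem pvSiftdown_length (h : List (Int × Int)) (x : Int × Int) (pos : Nat) :
    (pvSiftdown h x pos).length = h.length := pvSiftdownGo_length pos h x pos

theorem pvSiftupGo_length : ∀ (fuel : Nat) (h : List (Int × Int)) (x : Int × Int) (pos : Nat),
    (pvSiftupGo fuel h x pos).length = h.length
  | 0, h, x, pos => by simp [pvSiftupGo, pvSiftdown_length]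
  | fuel + 1, h, x, pos => by
    rw [pvSiftupGo]
    split
    · split
      · rw [pvSiftupGo_length]; simp
      · rw [pvSiftupGo_length]; simp
    · simp [pvSiftdown_length]

theorem pvSiftup_length (h : List (Int × Int)) (x : Int × Int) (pos : Nat) :
    (pvSiftup h x pos).length = h.length := pvSiftupGo_length _ h x pos

theorem pvHeappop_length (h : List (Int × Int)) :
    (pvHeappop h).2.length = h.length - 1 := by
  simp only [pvHeappop]
  split <;> simp [pvSiftup_length]


-- basic order facts about pvLt
theorem pvLt_irrefl (a : Int × Int) : pvLt a a = false := by simp [pvLt]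

theorem pvLt_asymm {a b : Int × Int} (hab : pvLt a b = true) : pvLt b a = false := by
  simp [pvLt] at *; omega

theorem pvLt_trans {a b c : Int × Int} (hab : pvLt a b = true) (hbc : pvLt b c = true) :
    pvLt a c = true := by
  simp [pvLt] at *; omega

theorem pvLt_compl_trans {a b c : Int × Int} (hab : pvLt b a = false) (hbc : pvLt c b = false) :
    pvLt c a = false := by
  simp [pvLt] at *; omega

-- pvHget / List.set plumbing
theorem pvHget_eq_getElem {h : List (Int × Int)} {i : Nat} (hi : i < h.length) :
    pvHget h i = h[i] := by
  simp [pvHget, List.getD_eq_getElem?_getD, List.getElem?_eq_getElem hi]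

theorem pvHget_set {h : List (Int × Int)} {p : Nat} (v : Int × Int) (i : Nat) :
    pvHget (h.set p v) i = if i = p ∧ p < h.length then v else pvHget h i := by
  simp only [pvHget, List.getD_eq_getElem?_getD, List.getElem?_set]
  by_cases hip : i = p
  · subst hip
    by_cases hp : i < h.length
    · simp [hp]
    · rw [List.getElem?_eq_none (by omega)]
      simp [hp]
  · have hpi : ¬ p = i := fun h => hip h.symm
    simp [hip, hpi]

theorem set_perm : ∀ {h : List (Int × Int)} {i : Nat} (v : Int × Int), i < h.length →
    (h.set i v).Perm (v :: h.eraseIdx i)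
  | [], i, v, hi => by simp at hi
  | x :: t, 0, v, _ => by simp
  | x :: t, i + 1, v, hi => by
    simp only [List.set_cons_succ, List.eraseIdx_cons_succ]
    exact ((set_perm v (by simpa using hi)).cons x).trans (List.Perm.swap v x _)

theorem set_pvHget_self {h : List (Int × Int)} {i : Nat} (hi : i < h.length) :
    h.set i (pvHget h i) = h := by
  rw [pvHget_eq_getElem hi, List.set_getElem_self]

theorem swap_set_perm : ∀ {h : List (Int × Int)} {a b : Nat} (x : Int × Int),
    a < h.length → b < h.length → a ≠ b →
    ((h.set a (pvHget h b)).set b x).Perm (h.set a x)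
  | [], a, b, x, ha, hb, hne => by simp at ha
  | y :: t, 0, 0, x, ha, hb, hne => absurd rfl hne
  | y :: t, a + 1, b, x, ha, hb, hne => by
    match b, hne with
    | 0, _ =>
      have ha' : a < t.length := by simpa using ha
      have h1 : pvHget (y :: t) 0 = y := by simp [pvHget]
      simp only [List.set_cons_succ, h1, List.set_cons_zero]
      refine ((set_perm y ha').cons x).trans (.trans (List.Perm.swap y x _) ?_)
      exact ((set_perm x ha').cons y).symm
    | b + 1, hne =>
      have h1 : pvHget (y :: t) (b + 1) = pvHget t b := by simp [pvHget]
      simp only [List.set_cons_succ, h1]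
      exact (swap_set_perm x (by simpa using ha) (by simpa using hb) (by omega)).cons y
  | y :: t, 0, b + 1, x, ha, hb, hne => by
    have hb' : b < t.length := by simpa using hb
    have h1 : pvHget (y :: t) (b + 1) = pvHget t b := by simp [pvHget]
    simp only [h1, List.set_cons_zero, List.set_cons_succ]
    have h2 : t.Perm (pvHget t b :: t.eraseIdx b) := by
      conv_lhs => rw [← set_pvHget_self hb']
      exact set_perm _ hb'
    exact ((set_perm x hb').cons _).trans ((List.Perm.swap x _ _).trans (h2.symm.cons x))


-- heap predicates (proof-only)
def IsChild (i j : Nat) : Prop := j = 2 * i + 1 ∨ j = 2 * i + 2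

def HeapInv (h : List (Int × Int)) : Prop :=
  ∀ i j, j < h.length → IsChild i j → pvLt (pvHget h j) (pvHget h i) = false

def AH (h : List (Int × Int)) (pos : Nat) : Prop :=
  ∀ i j, j < h.length → IsChild i j → j ≠ pos → pvLt (pvHget h j) (pvHget h i) = false

def AHD (h : List (Int × Int)) (pos : Nat) : Prop :=
  ∀ i j, j < h.length → IsChild i j → i ≠ pos → j ≠ pos → pvLt (pvHget h j) (pvHget h i) = false

theorem IsChild_lt {i j : Nat} (h : IsChild i j) : i < j := by
  unfold IsChild at h; omega

theorem parent_child {pos : Nat} (h0 : 0 < pos) : IsChild ((pos - 1) / 2) pos := by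
  unfold IsChild; omega

theorem child_eq_parent {i pos : Nat} (h0 : 0 < pos) (hc : IsChild i pos) : i = (pos - 1) / 2 := by
  unfold IsChild at hc; omega

theorem heap_set_of (h : List (Int × Int)) (x : Int × Int) (pos : Nat)
    (hp : pos < h.length) (hah : AH h pos)
    (hch : ∀ j, j < h.length → IsChild pos j → pvLt (pvHget h j) x = false)
    (hstop : 0 < pos → pvLt x (pvHget h ((pos - 1) / 2)) = false) :
    HeapInv (h.set pos x) := by
  have hvx : ∀ i, pvHget (h.set pos x) i = if i = pos then x else pvHget h i := by
    intro i; rw [pvHget_set]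
    by_cases hi : i = pos
    · simp [hi, hp]
    · simp [hi]
  intro i j hj hc
  rw [List.length_set] at hj
  rw [hvx j, hvx i]
  by_cases hjpos : j = pos
  · have h0 : 0 < pos := by subst hjpos; have := IsChild_lt hc; omega
    have hipar : i = (pos - 1) / 2 := by subst hjpos; exact child_eq_parent h0 hc
    rw [if_pos hjpos, hipar, if_neg (by omega : ¬ (pos - 1) / 2 = pos)]
    exact hstop h0
  · rw [if_neg hjpos]
    by_cases hipos : i = pos
    · rw [if_pos hipos]; subst hipos; exact hch j hj hc
    · rw [if_neg hipos]; exact hah i j hj hc hjpos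

theorem pvSiftdownGo_ok : ∀ (fuel : Nat) (h : List (Int × Int)) (x : Int × Int) (pos : Nat),
    pos ≤ fuel → pos < h.length → AH h pos →
    (∀ j, j < h.length → IsChild pos j → pvLt (pvHget h j) x = false) →
    (∀ j, j < h.length → IsChild pos j → 0 < pos →
      pvLt (pvHget h j) (pvHget h ((pos - 1) / 2)) = false) →
    HeapInv (pvSiftdownGo fuel h x pos) ∧ (pvSiftdownGo fuel h x pos).Perm (h.set pos x) := by
  intro fuel
  induction fuel with
  | zero =>
    intro h x pos hf hp hah hch hgp
    have hpos : pos = 0 := by omega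
    subst hpos
    rw [pvSiftdownGo]
    exact ⟨heap_set_of h x 0 hp hah hch (by omega), List.Perm.refl _⟩
  | succ fuel ih =>
    intro h x pos hf hp hah hch hgp
    rw [pvSiftdownGo]
    by_cases h0 : 0 < pos
    · rw [if_pos h0]
      by_cases hmv : pvLt x (pvHget h ((pos - 1) / 2)) = true
      · rw [if_pos hmv]
        have hparlt : (pos - 1) / 2 < pos := by omega
        have hparlen : (pos - 1) / 2 < h.length := by omega
        have hv : ∀ i, pvHget (h.set pos (pvHget h ((pos - 1) / 2))) i =
            if i = pos then pvHget h ((pos - 1) / 2) else pvHget h i := by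
          intro i; rw [pvHget_set]
          by_cases hi : i = pos
          · simp [hi, hp]
          · simp [hi]
        have hAH : AH (h.set pos (pvHget h ((pos - 1) / 2))) ((pos - 1) / 2) := by
          intro i j hj hc hjpar
          rw [List.length_set] at hj
          rw [hv j, hv i]
          by_cases hjpos : j = pos
          · have hipar : i = (pos - 1) / 2 := by subst hjpos; exact child_eq_parent h0 hc
            rw [if_pos hjpos, hipar, if_neg (by omega : ¬ (pos - 1) / 2 = pos)]
            exact pvLt_irrefl _
          · rw [if_neg hjpos]
            by_cases hipos : i = pos
            · rw [if_pos hipos]; subst hipos; exact hgp j hj hc h0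
            · rw [if_neg hipos]; exact hah i j hj hc hjpos
        have hCH : ∀ j, j < (h.set pos (pvHget h ((pos - 1) / 2))).length →
            IsChild ((pos - 1) / 2) j →
            pvLt (pvHget (h.set pos (pvHget h ((pos - 1) / 2))) j) x = false := by
          intro j hj hc
          rw [List.length_set] at hj
          rw [hv j]
          by_cases hjpos : j = pos
          · rw [if_pos hjpos]; exact pvLt_asymm hmv
          · rw [if_neg hjpos]
            cases hb : pvLt (pvHget h j) x with
            | false => rfl
            | true =>
              have h1 : pvLt (pvHget h j) (pvHget h ((pos - 1) / 2)) = true := pvLt_trans hb hmv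
              have h2 := hah ((pos - 1) / 2) j hj hc hjpos
              rw [h1] at h2; cases h2
        have hGP : ∀ j, j < (h.set pos (pvHget h ((pos - 1) / 2))).length →
            IsChild ((pos - 1) / 2) j → 0 < (pos - 1) / 2 →
            pvLt (pvHget (h.set pos (pvHget h ((pos - 1) / 2))) j)
              (pvHget (h.set pos (pvHget h ((pos - 1) / 2))) (((pos - 1) / 2 - 1) / 2)) = false := by
          intro j hj hc hpar0
          rw [List.length_set] at hj
          have hg : ¬ ((pos - 1) / 2 - 1) / 2 = pos := by omega
          rw [hv j, hv (((pos - 1) / 2 - 1) / 2), if_neg hg]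
          have hparpair : pvLt (pvHget h ((pos - 1) / 2)) (pvHget h (((pos - 1) / 2 - 1) / 2)) = false :=
            hah (((pos - 1) / 2 - 1) / 2) ((pos - 1) / 2) hparlen (parent_child hpar0) (by omega)
          by_cases hjpos : j = pos
          · rw [if_pos hjpos]; exact hparpair
          · rw [if_neg hjpos]
            exact pvLt_compl_trans hparpair (hah ((pos - 1) / 2) j hj hc hjpos)
        obtain ⟨hinv, hperm⟩ := ih (h.set pos (pvHget h ((pos - 1) / 2))) x ((pos - 1) / 2)
          (by omega) (by simpa using hparlen) hAH hCH hGP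
        exact ⟨hinv, hperm.trans (swap_set_perm x hp hparlen (by omega))⟩
      · rw [if_neg hmv]
        rw [Bool.not_eq_true] at hmv
        exact ⟨heap_set_of h x pos hp hah hch (fun _ => hmv), List.Perm.refl _⟩
    · rw [if_neg h0]
      exact ⟨heap_set_of h x pos hp hah hch (by omega), List.Perm.refl _⟩

theorem pvSiftdown_ok (pos : Nat) (h : List (Int × Int)) (x : Int × Int)
    (hp : pos < h.length) (hah : AH h pos)
    (hch : ∀ j, j < h.length → IsChild pos j → pvLt (pvHget h j) x = false)
    (hgp : ∀ j, j < h.length → IsChild pos j → 0 < pos →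
      pvLt (pvHget h j) (pvHget h ((pos - 1) / 2)) = false) :
    HeapInv (pvSiftdown h x pos) ∧ (pvSiftdown h x pos).Perm (h.set pos x) :=
  pvSiftdownGo_ok pos h x pos le_rfl hp hah hch hgp

theorem pvSiftupGo_ok : ∀ (fuel : Nat) (h : List (Int × Int)) (x : Int × Int) (pos : Nat),
    h.length - pos ≤ fuel + 1 → pos < h.length → AHD h pos →
    (0 < pos → ∀ j, j < h.length → IsChild pos j →
      pvLt (pvHget h j) (pvHget h ((pos - 1) / 2)) = false) →
    HeapInv (pvSiftupGo fuel h x pos) ∧ (pvSiftupGo fuel h x pos).Perm (h.set pos x) := by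
  intro fuel
  induction fuel using Nat.strong_induction_on with
  | _ fuel ih =>
    intro h x pos hn hp hahd hgp
    match fuel with
    | 0 =>
      have hleaf : ¬ 2 * pos + 1 < h.length := by omega
      rw [pvSiftupGo]
      have hvx : ∀ i, pvHget (h.set pos x) i = if i = pos then x else pvHget h i := by
        intro i; rw [pvHget_set]
        by_cases hi : i = pos
        · simp [hi, hp]
        · simp [hi]
      have hAH : AH (h.set pos x) pos := by
        intro i j hj hc hjpos
        rw [List.length_set] at hj
        rw [hvx j, hvx i, if_neg hjpos]
        by_cases hipos : i = pos
        · exfalso; subst hipos; unfold IsChild at hc; omega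
        · rw [if_neg hipos]; exact hahd i j hj hc hipos hjpos
      have := pvSiftdown_ok pos (h.set pos x) x (by simpa using hp) hAH
        (fun j hj hc => by exfalso; rw [List.length_set] at hj; unfold IsChild at hc; omega)
        (fun j hj hc _ => by exfalso; rw [List.length_set] at hj; unfold IsChild at hc; omega)
      rw [List.set_set] at this
      exact this
    | fuel + 1 =>
    rw [pvSiftupGo]
    by_cases hleaf : 2 * pos + 1 < h.length
    · rw [if_pos hleaf]
      -- step: choose the smaller child c, move it into the hole, recurse at c
      have main : ∀ c, c = 2 * pos + 1 ∨ c = 2 * pos + 2 → c < h.length →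
          (∀ s, s < h.length → IsChild pos s → s ≠ c → pvLt (pvHget h s) (pvHget h c) = false) →
          HeapInv (pvSiftupGo fuel (h.set pos (pvHget h c)) x c) ∧
            (pvSiftupGo fuel (h.set pos (pvHget h c)) x c).Perm (h.set pos x) := by
        intro c hcchild hclen hmin
        have hposc : pos < c := by omega
        have hv : ∀ i, pvHget (h.set pos (pvHget h c)) i =
            if i = pos then pvHget h c else pvHget h i := by
          intro i; rw [pvHget_set]
          by_cases hi : i = pos
          · simp [hi, hp]
          · simp [hi]
        have hAHD : AHD (h.set pos (pvHget h c)) c := by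
          intro i j hj hc' hic hjc
          rw [List.length_set] at hj
          rw [hv j, hv i]
          by_cases hjpos : j = pos
          · have h0 : 0 < pos := by
              rcases hc' with hc' | hc' <;> omega
            have hipar : i = (pos - 1) / 2 := by subst hjpos; exact child_eq_parent h0 hc'
            rw [if_pos hjpos, hipar, if_neg (by omega : ¬ (pos - 1) / 2 = pos)]
            exact hgp h0 c hclen (by unfold IsChild; omega)
          · rw [if_neg hjpos]
            by_cases hipos : i = pos
            · rw [if_pos hipos]; subst hipos
              exact hmin j hj hc' hjc
            · rw [if_neg hipos]; exact hahd i j hj hc' hipos hjpos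
        have hGP : 0 < c → ∀ j, j < (h.set pos (pvHget h c)).length → IsChild c j →
            pvLt (pvHget (h.set pos (pvHget h c)) j)
              (pvHget (h.set pos (pvHget h c)) ((c - 1) / 2)) = false := by
          intro _ j hj hc'
          rw [List.length_set] at hj
          have hcpar : (c - 1) / 2 = pos := by omega
          have hjpos : ¬ j = pos := by have := IsChild_lt hc'; omega
          rw [hv j, hv ((c - 1) / 2), hcpar, if_pos rfl, if_neg hjpos]
          exact hahd c j hj hc' (by omega) hjpos
        obtain ⟨hinv, hperm⟩ := ih fuel (by omega) (h.set pos (pvHget h c)) x c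
          (by simp; omega) (by simpa using hclen) hAHD hGP
        exact ⟨hinv, hperm.trans (swap_set_perm x hp hclen (by omega))⟩
      by_cases hr : 2 * pos + 2 < h.length ∧
          pvLt (pvHget h (2 * pos + 1)) (pvHget h (2 * pos + 2)) = false
      · rw [if_pos hr]
        refine main (2 * pos + 2) (by omega) hr.1 ?_
        intro s hs hcs hsne
        have hs1 : s = 2 * pos + 1 := by unfold IsChild at hcs; omega
        subst hs1; exact hr.2
      · rw [if_neg hr]
        refine main (2 * pos + 1) (by omega) hleaf ?_
        intro s hs hcs hsne
        have hs2 : s = 2 * pos + 2 := by unfold IsChild at hcs; omega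
        subst hs2
        have : pvLt (pvHget h (2 * pos + 1)) (pvHget h (2 * pos + 2)) = true := by
          rcases Bool.eq_false_or_eq_true (pvLt (pvHget h (2 * pos + 1)) (pvHget h (2 * pos + 2)))
            with hb | hb
          · exact hb
          · exact absurd ⟨hs, hb⟩ hr
        exact pvLt_asymm this
    · rw [if_neg hleaf]
      -- leaf: sift newitem up from the leaf position
      have hvx : ∀ i, pvHget (h.set pos x) i = if i = pos then x else pvHget h i := by
        intro i; rw [pvHget_set]
        by_cases hi : i = pos
        · simp [hi, hp]
        · simp [hi]
      have hAH : AH (h.set pos x) pos := by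
        intro i j hj hc hjpos
        rw [List.length_set] at hj
        rw [hvx j, hvx i, if_neg hjpos]
        by_cases hipos : i = pos
        · exfalso; subst hipos; unfold IsChild at hc; omega
        · rw [if_neg hipos]; exact hahd i j hj hc hipos hjpos
      have := pvSiftdown_ok pos (h.set pos x) x (by simpa using hp) hAH
        (fun j hj hc => by exfalso; rw [List.length_set] at hj; unfold IsChild at hc; omega)
        (fun j hj hc _ => by exfalso; rw [List.length_set] at hj; unfold IsChild at hc; omega)
      rw [List.set_set] at this
      exact this

theorem pvSiftup_ok (h : List (Int × Int)) (x : Int × Int) (pos : Nat)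
    (hp : pos < h.length) (hahd : AHD h pos)
    (hgp : 0 < pos → ∀ j, j < h.length → IsChild pos j →
      pvLt (pvHget h j) (pvHget h ((pos - 1) / 2)) = false) :
    HeapInv (pvSiftup h x pos) ∧ (pvSiftup h x pos).Perm (h.set pos x) :=
  pvSiftupGo_ok (h.length - pos) h x pos (by omega) hp hahd hgp

theorem pvHget_append_lt {h : List (Int × Int)} {k : Nat} (x : Int × Int) (hk : k < h.length) :
    pvHget (h ++ [x]) k = pvHget h k := by
  simp [pvHget, List.getD_eq_getElem?_getD, List.getElem?_append_left hk]

theorem pvHget_append_self (h : List (Int × Int)) (x : Int × Int) :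
    pvHget (h ++ [x]) h.length = x := by
  simp [pvHget, List.getD_eq_getElem?_getD]

theorem pvHeappush_ok (h : List (Int × Int)) (x : Int × Int) (hh : HeapInv h) :
    HeapInv (pvHeappush h x) ∧ (pvHeappush h x).Perm (x :: h) := by
  have hp : h.length < (h ++ [x]).length := by simp
  obtain ⟨hinv, hperm⟩ := pvSiftdown_ok h.length (h ++ [x]) x hp
    (by
      intro i j hj hc hjne
      simp only [List.length_append, List.length_cons, List.length_nil] at hj
      have hjlt : j < h.length := by omega
      have hilt : i < h.length := lt_trans (IsChild_lt hc) hjlt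
      rw [pvHget_append_lt x hjlt, pvHget_append_lt x hilt]
      exact hh i j hjlt hc)
    (by
      intro j hj hc
      exfalso
      simp only [List.length_append, List.length_cons, List.length_nil] at hj
      unfold IsChild at hc; omega)
    (by
      intro j hj hc _
      exfalso
      simp only [List.length_append, List.length_cons, List.length_nil] at hj
      unfold IsChild at hc; omega)
  rw [pvHeappush]
  refine ⟨hinv, hperm.trans ?_⟩
  have : (h ++ [x]).set h.length x = h ++ [x] := by
    conv_rhs => rw [← set_pvHget_self (i := h.length) hp, pvHget_append_self]
  rw [this]
  exact List.perm_append_singleton x h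

theorem root_min (h : List (Int × Int)) (hh : HeapInv h) :
    ∀ i, i < h.length → pvLt (pvHget h i) (pvHget h 0) = false := by
  intro i
  induction i using Nat.strong_induction_on with
  | _ i ih =>
    intro hi
    by_cases h0 : i = 0
    · subst h0; exact pvLt_irrefl _
    · have h0' : 0 < i := by omega
      have hpar := hh ((i - 1) / 2) i hi (parent_child h0')
      have hrec := ih ((i - 1) / 2) (by omega) (by omega)
      exact pvLt_compl_trans hrec hpar

theorem pvHeappop_ok (h : List (Int × Int)) (hh : HeapInv h) (hne : h ≠ []) :
    (pvHeappop h).1 = pvHget h 0 ∧ HeapInv (pvHeappop h).2 ∧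
      (pvHget h 0 :: (pvHeappop h).2).Perm h := by
  have hlen : 0 < h.length := List.length_pos_of_ne_nil hne
  by_cases h1 : h.length = 1
  · -- singleton heap
    obtain ⟨v, rfl⟩ : ∃ v, h = [v] := by
      match h, h1 with
      | [v], _ => exact ⟨v, rfl⟩
    refine ⟨by simp [pvHeappop], ?_, by simp [pvHeappop, pvHget]⟩
    intro i j hj hc
    simp [pvHeappop] at hj
  · have hlen2 : 2 ≤ h.length := by omega
    have hd : ¬ h.dropLast.isEmpty := by
      rw [List.isEmpty_iff, ← List.length_eq_zero_iff, List.length_dropLast]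
      omega
    have hdlen : h.dropLast.length = h.length - 1 := by simp
    have hdget : ∀ k, k < h.length - 1 → pvHget h.dropLast k = pvHget h k := by
      intro k hk
      rw [pvHget_eq_getElem (by omega), pvHget_eq_getElem (by omega), List.getElem_dropLast]
    have h0lt : (0 : Nat) < h.dropLast.length := by omega
    have hv : ∀ i, pvHget (h.dropLast.set 0 (pvHget h (h.length - 1))) i =
        if i = 0 then pvHget h (h.length - 1) else pvHget h.dropLast i := by
      intro i; rw [pvHget_set]
      by_cases hi : i = 0
      · rw [if_pos ⟨hi, h0lt⟩, if_pos hi]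
      · rw [if_neg (fun hc => hi hc.1), if_neg hi]
    obtain ⟨hinv, hperm⟩ := pvSiftup_ok
      (h.dropLast.set 0 (pvHget h (h.length - 1))) (pvHget h (h.length - 1)) 0
      (by simpa using h0lt)
      (by
        intro i j hj hc hi0 hj0
        rw [List.length_set] at hj
        have hij := IsChild_lt hc
        rw [hv j, hv i, if_neg hj0, if_neg hi0]
        rw [hdget j (by omega), hdget i (by omega)]
        exact hh i j (by omega) hc)
      (by intro h0; exact absurd h0 (by omega))
    rw [List.set_set] at hperm
    have hpop : pvHeappop h = (pvHget h.dropLast 0,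
        pvSiftup (h.dropLast.set 0 (pvHget h (h.length - 1))) (pvHget h (h.length - 1)) 0) := by
      rw [pvHeappop]
      simp only [hd, if_neg, Bool.false_eq_true, not_false_eq_true]
    rw [hpop]
    have hget0 : pvHget h.dropLast 0 = pvHget h 0 := hdget 0 (by omega)
    refine ⟨hget0, hinv, ?_⟩
    -- permutation bookkeeping
    have hperm2 : (pvSiftup (h.dropLast.set 0 (pvHget h (h.length - 1)))
        (pvHget h (h.length - 1)) 0).Perm
        (pvHget h (h.length - 1) :: h.dropLast.eraseIdx 0) :=
      hperm.trans (set_perm _ h0lt)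
    have hsplit : h = h.dropLast ++ [pvHget h (h.length - 1)] := by
      conv_lhs => rw [← List.dropLast_concat_getLast hne]
      rw [List.getLast_eq_getElem, pvHget_eq_getElem (by omega)]
    have hne' : h.dropLast ≠ [] := by
      rw [← List.length_pos_iff_ne_nil]; omega
    obtain ⟨a, t, hat⟩ := List.exists_cons_of_ne_nil hne'
    have ha : a = pvHget h 0 := by
      rw [← hget0, hat]; simp [pvHget]
    have hcons : h.dropLast = pvHget h 0 :: h.dropLast.tail := by
      rw [hat, ha] at *; rfl
    have herase : h.dropLast.eraseIdx 0 = h.dropLast.tail := by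
      rw [hat]; rfl
    rw [herase] at hperm2
    refine ((hperm2.cons (pvHget h 0)).trans ?_)
    refine (List.Perm.swap _ _ _).trans ?_
    rw [← hcons]
    conv_rhs => rw [hsplit]
    exact (List.perm_append_singleton _ _).symm

-- generic insertion-sort machinery (for sorted2's foldl insertBy)
theorem insertBy_pairwise {α : Type} (before : α → α → Bool)
    (htr : ∀ a b c, before a b = true → before b c = true → before a c = true)
    (hasym : ∀ a b, before a b = true → before b a = false)
    (x : α) : ∀ (l : List α), l.Pairwise (fun a b => before b a = false) →
    (PySem.List.insertBy before x l).Pairwise (fun a b => before b a = false)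
  | [], _ => by simp [PySem.List.insertBy]
  | y :: ys, hl => by
    rw [PySem.List.insertBy]
    rw [List.pairwise_cons] at hl
    split
    · next hxy =>
      rw [List.pairwise_cons]
      refine ⟨?_, List.pairwise_cons.mpr hl⟩
      intro b hb
      rcases List.mem_cons.mp hb with rfl | hb
      · exact hasym x b hxy
      · cases hbx : before b x with
        | false => rfl
        | true =>
          have := htr b x y hbx hxy
          rw [hl.1 b hb] at this; cases this
    · next hxy =>
      rw [List.pairwise_cons]
      refine ⟨?_, insertBy_pairwise before htr hasym x ys hl.2⟩
      intro b hb
      rw [PySem.List.mem_insertBy] at hb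
      rcases hb with rfl | hb
      · simpa using hxy
      · exact hl.1 b hb

theorem foldl_insertBy_pairwise {α : Type} (before : α → α → Bool)
    (htr : ∀ a b c, before a b = true → before b c = true → before a c = true)
    (hasym : ∀ a b, before a b = true → before b a = false) :
    ∀ (xs : List α) (acc : List α), acc.Pairwise (fun a b => before b a = false) →
    (xs.foldl (fun acc x => PySem.List.insertBy before x acc) acc).Pairwise
      (fun a b => before b a = false)
  | [], _, hacc => hacc
  | x :: xs, acc, hacc =>
    foldl_insertBy_pairwise before htr hasym xs _ (insertBy_pairwise before htr hasym x acc hacc)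

-- main loop equivalence: A's heap loop equals the cursor loop over the sorted list
theorem loopGo_eq : ∀ (fuel : Nat) (h ys : List (Int × Int)) (prev K : Int),
    h.length ≤ fuel → HeapInv h → h.Perm ys →
    ys.Pairwise (fun a b => pvLt a b = true) → (ys.map (fun p => p.2)).Nodup →
    pvLoopAGo fuel h prev K (h.length : Int) (-1) = pvLoopB ys prev K := by
  intro fuel
  induction fuel with
  | zero =>
    intro h ys prev K hn hh hp hsort hnd
    have h0 : h = [] := by
      cases h with
      | nil => rfl
      | cons a t => simp at hn
    subst h0
    have hys : ys = [] := hp.symm.eq_nil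
    subst hys
    rw [pvLoopAGo, pvLoopB]
  | succ fuel ih =>
    intro h ys prev K hn hh hp hsort hnd
    match ys with
    | [] =>
      have h0 : h = [] := hp.eq_nil
      subst h0
      rw [pvLoopAGo]
      simp [pvLoopB]
    | m :: rest =>
      have hne : h ≠ [] := by
        intro h0; subst h0; exact absurd hp.symm.eq_nil (by simp)
      have hlen_eq : h.length = (m :: rest).length := hp.length_eq
      have hlen0 : 0 < h.length := List.length_pos_of_ne_nil hne
      -- the heap root is the lexicographic minimum m
      have hroot : pvHget h 0 = m := by
        have hmem : pvHget h 0 ∈ h := by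
          rw [pvHget_eq_getElem hlen0]; exact List.getElem_mem hlen0
        have hmem' : pvHget h 0 ∈ m :: rest := hp.subset hmem
        rcases List.mem_cons.mp hmem' with heq | hmem'
        · exact heq
        · exfalso
          obtain ⟨k, hk, hkm⟩ := List.getElem_of_mem (hp.mem_iff.mpr (List.mem_cons_self))
          have h1 : pvLt m (pvHget h 0) = true :=
            (List.pairwise_cons.mp hsort).1 _ hmem'
          have h2 := root_min h hh k hk
          rw [pvHget_eq_getElem hk, hkm] at h2
          rw [h1] at h2; cases h2
      rw [pvLoopAGo, if_neg (by simpa [List.isEmpty_iff] using hne)]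
      rw [pvLoopB]
      rw [hroot, hlen_eq]
      by_cases hK : K ≥ (m.1 - prev) * ((m :: rest).length : Int)
      · rw [if_pos hK, if_pos hK]
        obtain ⟨hpop1, hpop2, hpop3⟩ := pvHeappop_ok h hh hne
        have hperm' : (pvHeappop h).2.Perm rest := by
          rw [hroot] at hpop3
          exact (hpop3.trans hp).cons_inv
        have hlen' : ((m :: rest).length : Int) - 1 = ((pvHeappop h).2.length : Int) := by
          rw [pvHeappop_length, ← hlen_eq]
          omega
        rw [hpop1, hroot, hlen']
        exact ih _ rest _ _ (by rw [pvHeappop_length]; omega) hpop2 hperm'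
          (List.pairwise_cons.mp hsort).2 (by
            simpa using (List.nodup_cons.mp (by simpa using hnd)).2)
      · rw [if_neg hK, if_neg hK]
        have hzs : PySem.List.sorted (m :: rest) (fun x => x.2) false =
            PySem.List.sorted h (fun x => x.2) false := by
          refine PySem.List.sorted_eq_of_perm_of_pairwise_lt _ _ _ ?_ ?_
          · exact (PySem.List.sorted_perm h (fun x => x.2) false).trans hp
          · have h1 : (PySem.List.sorted h (fun x => x.2) false).Pairwise
                (fun a b => (fun x : Int × Int => x.2) a ≤ (fun x : Int × Int => x.2) b) :=
              PySem.List.sorted_pairwise h (fun x => x.2)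
            have h2 : ((PySem.List.sorted h (fun x => x.2) false).map (fun p => p.2)).Nodup := by
              refine (((PySem.List.sorted_perm h (fun x => x.2) false).trans hp).map
                (fun p : Int × Int => p.2)).nodup_iff.mpr hnd
            rw [List.Nodup, List.pairwise_map] at h2
            exact (h1.and h2).imp (fun hab => lt_of_le_of_ne hab.1 hab.2)
        rw [hzs]
    -- the comparison used by sorted2 with the fst/snd keys, and its relation to pvLt
def pvB (a b : Int × Int) : Bool :=
  decide (a.1 < b.1) || (!decide (b.1 < a.1) && decide (a.2 < b.2))

theorem pvB_trans (a b c : Int × Int) (hab : pvB a b = true) (hbc : pvB b c = true) :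
    pvB a c = true := by
  simp [pvB] at *; omega

theorem pvB_asym (a b : Int × Int) (hab : pvB a b = true) : pvB b a = false := by
  simp [pvB] at *; omega

theorem pvB_compl_lt {a b : Int × Int} (h : pvB b a = false) (hne : a ≠ b) :
    pvLt a b = true := by
  rcases a with ⟨a1, a2⟩; rcases b with ⟨b1, b2⟩
  simp [pvB, pvLt, Prod.mk.injEq] at *
  omega

theorem sorted2_foldl (xs : List (Int × Int)) :
    PySem.List.sorted2 xs (fun x => x.1) (fun x => x.2) false =
      xs.foldl (fun acc x => PySem.List.insertBy pvB x acc) [] := rfl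

theorem foldl_push_ok (g : Int → Int × Int) :
    ∀ (l : List Int) (acc : List (Int × Int)), HeapInv acc →
    HeapInv (l.foldl (fun h i => pvHeappush h (g i)) acc) ∧
      (l.foldl (fun h i => pvHeappush h (g i)) acc).Perm (l.map g ++ acc)
  | [], acc, hacc => ⟨hacc, by simp⟩
  | x :: l, acc, hacc => by
    obtain ⟨h1, h2⟩ := pvHeappush_ok acc (g x) hacc
    obtain ⟨h3, h4⟩ := foldl_push_ok g l (pvHeappush acc (g x)) h1
    refine ⟨h3, ?_⟩
    simp only [List.foldl_cons, List.map_cons, List.cons_append]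
    exact (h4.trans ((List.Perm.append_left _ h2))).trans List.perm_middle

theorem map_eq_zip (ft : List Int) :
    (PySem.List.pyRange 0 (ft.length : Int) 1).map
        (fun i => (PySem.List.pyGetD ft i 0, i + 1)) =
      ft.zip (PySem.List.pyRange 1 ((ft.length : Int) + 1) 1) := by
  apply List.ext_getElem
  · simp [PySem.List.length_pyRange_one]
  · intro k h1 h2
    have hk : k < ft.length := by
      simpa [PySem.List.length_pyRange_one] using h1
    simp only [List.getElem_map, List.getElem_zip, PySem.List.getElem_pyRange_one]
    have hz : (0 : Int) + (k : Int) = ((k : Nat) : Int) := by omega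
    rw [hz, PySem.List.pyGetD_natCast]
    rw [List.getD_eq_getElem?_getD, List.getElem?_eq_getElem hk]
    simp only [Option.getD_some, Prod.mk.injEq]
    exact ⟨trivial, by omega⟩

-- ==== new development: the cursor loop equals the threshold/binary-search computation ====

-- relative spend: time consumed from state (ys, prev) when every food is eaten up to level v
def pvRel (ys : List (Int × Int)) (prev v : Int) : Int :=
  (ys.map (fun p => min p.1 v - prev)).sum

theorem pvRel_nil (prev v : Int) : pvRel [] prev v = 0 := rfl

theorem pvRel_cons (q : Int × Int) (rest : List (Int × Int)) (prev v : Int) :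
    pvRel (q :: rest) prev v = (min q.1 v - prev) + pvRel rest prev v := by
  simp [pvRel]

theorem pvRel_shift : ∀ (ys : List (Int × Int)) (prev c v : Int),
    pvRel ys prev v = pvRel ys c v + (c - prev) * (ys.length : Int)
  | [], prev, c, v => by simp [pvRel]
  | q :: rest, prev, c, v => by
    rw [pvRel_cons, pvRel_cons, pvRel_shift rest prev c v]
    push_cast [List.length_cons]
    ring

theorem pvRel_mono : ∀ (ys : List (Int × Int)) (prev : Int) {v w : Int}, v ≤ w →
    pvRel ys prev v ≤ pvRel ys prev w
  | [], _, _, _, _ => le_rfl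
  | q :: rest, prev, v, w, hvw => by
    rw [pvRel_cons, pvRel_cons]
    have h1 := pvRel_mono rest prev hvw
    have h2 : min q.1 v ≤ min q.1 w := min_le_min le_rfl hvw
    omega

theorem pvRel_const : ∀ (ys : List (Int × Int)) (prev c : Int),
    (∀ p ∈ ys, c ≤ p.1) → pvRel ys prev c = (c - prev) * (ys.length : Int)
  | [], prev, c, _ => by simp [pvRel]
  | q :: rest, prev, c, h => by
    rw [pvRel_cons, min_eq_right (h q List.mem_cons_self),
      pvRel_const rest prev c (fun p hp => h p (List.mem_cons_of_mem q hp))]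
    push_cast [List.length_cons]
    ring

theorem sum_sub_shift : ∀ (ys : List (Int × Int)) (prev c : Int),
    (ys.map (fun p => p.1 - prev)).sum =
      (ys.map (fun p => p.1 - c)).sum + (c - prev) * (ys.length : Int)
  | [], prev, c => by simp
  | q :: rest, prev, c => by
    simp only [List.map_cons, List.sum_cons, sum_sub_shift rest prev c]
    push_cast [List.length_cons]
    ring

-- the cursor loop's break value, characterised by a threshold certificate
theorem cursor_eq : ∀ (ys : List (Int × Int)) (prev K v : Int),
    ys.Pairwise (fun a b => pvLt a b = true) →
    pvRel ys prev v ≤ K → K < pvRel ys prev (v + 1) →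
    pvLoopB ys prev K =
      (PySem.List.pyGetD
        (PySem.List.sorted (ys.filter (fun p => decide (v < p.1))) (fun x => x.2) false)
        (K - pvRel ys prev v) ((0 : Int), (0 : Int))).2
  | [], prev, K, v, _, h1, h2 => by
    rw [pvRel_nil] at h1 h2; omega
  | q :: rest, prev, K, v, hs, h1, h2 => by
    have hq : ∀ p ∈ rest, q.1 ≤ p.1 := by
      intro p hp
      have := (List.pairwise_cons.mp hs).1 p hp
      simp [pvLt] at this; omega
    have hqall : ∀ p ∈ q :: rest, q.1 ≤ p.1 := by
      intro p hp
      rcases List.mem_cons.mp hp with rfl | hp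
      · exact le_rfl
      · exact hq p hp
    rw [pvLoopB]
    by_cases hK : K ≥ (q.1 - prev) * ((q :: rest).length : Int)
    · rw [if_pos hK]
      have hrel_q : pvRel (q :: rest) prev q.1 = (q.1 - prev) * ((q :: rest).length : Int) :=
        pvRel_const _ _ _ hqall
      have hqv : q.1 ≤ v := by
        by_contra hlt
        push_neg at hlt
        have := pvRel_mono (q :: rest) prev (show v + 1 ≤ q.1 by omega)
        omega
      have hid : ∀ w, q.1 ≤ w → pvRel (q :: rest) prev w =
          (q.1 - prev) * ((q :: rest).length : Int) + pvRel rest q.1 w := by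
        intro w hw
        rw [pvRel_cons, min_eq_left hw, pvRel_shift rest prev q.1 w]
        push_cast [List.length_cons]
        ring
      have h1' : pvRel rest q.1 v ≤ K - (q.1 - prev) * ((q :: rest).length : Int) := by
        rw [hid v hqv] at h1; omega
      have h2' : K - (q.1 - prev) * ((q :: rest).length : Int) < pvRel rest q.1 (v + 1) := by
        rw [hid (v + 1) (by omega)] at h2; omega
      rw [cursor_eq rest q.1 _ v (List.pairwise_cons.mp hs).2 h1' h2']
      have hfq : (q :: rest).filter (fun p => decide (v < p.1)) =
          rest.filter (fun p => decide (v < p.1)) := by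
        rw [List.filter_cons, if_neg (by simpa using not_lt.mpr hqv)]
      have hidx : K - (q.1 - prev) * ((q :: rest).length : Int) - pvRel rest q.1 v =
          K - pvRel (q :: rest) prev v := by
        rw [hid v hqv]; ring
      rw [hfq, hidx]
    · rw [if_neg hK]
      push_neg at hK
      have hvq : v < q.1 := by
        by_contra hge
        push_neg at hge
        have hmono := pvRel_mono (q :: rest) prev hge
        rw [pvRel_const _ _ _ hqall] at hmono
        omega
      have e1 : pvRel (q :: rest) prev v = (v - prev) * ((q :: rest).length : Int) :=
        pvRel_const _ _ _ (fun p hp => le_trans (by omega) (hqall p hp))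
      have e2 : pvRel (q :: rest) prev (v + 1) = (v + 1 - prev) * ((q :: rest).length : Int) :=
        pvRel_const _ _ _ (fun p hp => le_trans (by omega) (hqall p hp))
      have hf : (q :: rest).filter (fun p => decide (v < p.1)) = q :: rest :=
        List.filter_eq_self.mpr (fun p hp => by
          simpa using lt_of_lt_of_le hvq (hqall p hp))
      rw [hf]
      have hl : (0 : Int) < ((q :: rest).length : Int) := by
        simp
      have hsplit : (v + 1 - prev) * ((q :: rest).length : Int) =
          (v - prev) * ((q :: rest).length : Int) + ((q :: rest).length : Int) := by ring
      have h0 : 0 ≤ K - (v - prev) * ((q :: rest).length : Int) := by rw [e1] at h1; omega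
      have hlt : K - (v - prev) * ((q :: rest).length : Int) < ((q :: rest).length : Int) := by
        rw [e2, hsplit] at h2; omega
      have hmod : PySem.Int.mod K ((q :: rest).length : Int) =
          K - pvRel (q :: rest) prev v := by
        rw [e1, PySem.Int.mod_eq_emod_of_pos hl]
        have hKeq : K = (K - (v - prev) * ((q :: rest).length : Int)) +
            (v - prev) * ((q :: rest).length : Int) := by ring
        calc K % ((q :: rest).length : Int)
            = ((K - (v - prev) * ((q :: rest).length : Int)) +
                (v - prev) * ((q :: rest).length : Int)) % ((q :: rest).length : Int) := by
              rw [← hKeq]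
          _ = (K - (v - prev) * ((q :: rest).length : Int)) % ((q :: rest).length : Int) := by
              rw [mul_comm (v - prev) ((q :: rest).length : Int), Int.add_mul_emod_self_left]
          _ = K - (v - prev) * ((q :: rest).length : Int) := Int.emod_eq_of_lt h0 hlt
      rw [hmod]

theorem cursor_neg : ∀ (ys : List (Int × Int)) (prev K : Int),
    ys.Pairwise (fun a b => pvLt a b = true) →
    (ys.map (fun p => p.1 - prev)).sum ≤ K →
    pvLoopB ys prev K = -1
  | [], _, _, _, _ => rfl
  | q :: rest, prev, K, hs, htot => by
    have hq : ∀ p ∈ rest, q.1 ≤ p.1 := by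
      intro p hp
      have := (List.pairwise_cons.mp hs).1 p hp
      simp [pvLt] at this; omega
    have hnn : 0 ≤ (rest.map (fun p => p.1 - q.1)).sum := by
      apply List.sum_nonneg
      intro x hx
      obtain ⟨p, hp, rfl⟩ := List.mem_map.mp hx
      have := hq p hp; omega
    have hshift := sum_sub_shift rest prev q.1
    have htot' : (q.1 - prev) * ((q :: rest).length : Int) +
        (rest.map (fun p => p.1 - q.1)).sum ≤ K := by
      simp only [List.map_cons, List.sum_cons] at htot
      rw [hshift] at htot
      push_cast [List.length_cons]
      nlinarith [htot]
    rw [pvLoopB, if_pos (by omega)]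
    exact cursor_neg rest q.1 _ (List.pairwise_cons.mp hs).2 (by omega)

-- ==== B-side lemmas ====

theorem sumMin_mono (ft : List Int) {v w : Int} (hvw : v ≤ w) :
    pvSumMin ft v ≤ pvSumMin ft w := by
  induction ft with
  | nil => simp [pvSumMin]
  | cons f r ih =>
    simp only [pvSumMin, List.map_cons, List.sum_cons] at *
    have := min_le_min (le_refl f) hvw
    omega

theorem sumMin_const (ft : List Int) (c : Int) (h : ∀ f ∈ ft, c ≤ f) :
    pvSumMin ft c = c * (ft.length : Int) := by
  induction ft with
  | nil => simp [pvSumMin]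
  | cons f r ih =>
    simp only [pvSumMin, List.map_cons, List.sum_cons] at *
    rw [min_eq_right (h f List.mem_cons_self), ih (fun x hx => h x (List.mem_cons_of_mem f hx))]
    push_cast [List.length_cons]
    ring

theorem sumMin_of_ge (ft : List Int) (M : Int) (h : ∀ f ∈ ft, f ≤ M) :
    pvSumMin ft M = ft.sum := by
  induction ft with
  | nil => simp [pvSumMin]
  | cons f r ih =>
    simp only [pvSumMin, List.map_cons, List.sum_cons] at *
    rw [min_eq_left (h f List.mem_cons_self), ih (fun x hx => h x (List.mem_cons_of_mem f hx))]

theorem sumMin_succ (ft : List Int) (v : Int) :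
    pvSumMin ft (v + 1) = pvSumMin ft v +
      ((ft.filter (fun f => decide (v < f))).length : Int) := by
  induction ft with
  | nil => simp [pvSumMin]
  | cons f r ih =>
    simp only [pvSumMin, List.map_cons, List.sum_cons, List.filter_cons] at *
    by_cases hvf : v < f
    · have h1 : min f (v + 1) = v + 1 := min_eq_right (by omega)
      have h2 : min f v = v := min_eq_right (by omega)
      simp only [hvf, decide_true, if_true, List.length_cons, h1, h2]
      push_cast
      omega
    · have h1 : min f (v + 1) = f := min_eq_left (by omega)
      have h2 : min f v = f := min_eq_left (by omega)
      simp only [hvf, decide_false, Bool.false_eq_true, if_false, h1, h2]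
      omega

theorem pvBsearchGo_cert (ft : List Int) (K : Int) :
    ∀ (fuel : Nat) (lo hi : Int), (hi - lo).toNat ≤ fuel →
    pvSumMin ft lo ≤ K → K < pvSumMin ft hi →
    pvSumMin ft (pvBsearchGo fuel ft K lo hi) ≤ K ∧
      K < pvSumMin ft (pvBsearchGo fuel ft K lo hi + 1) := by
  intro fuel
  induction fuel with
  | zero =>
    intro lo hi hn h1 h2
    exfalso
    have hlt : lo < hi := by
      by_contra hle
      push_neg at hle
      exact absurd (le_trans (sumMin_mono ft hle) h1) (not_le.mpr h2)
    omega
  | succ n ih =>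
    intro lo hi hn h1 h2
    have hlt : lo < hi := by
      by_contra hle
      push_neg at hle
      exact absurd (le_trans (sumMin_mono ft hle) h1) (not_le.mpr h2)
    rw [pvBsearchGo]
    by_cases hc : lo + 1 < hi
    · rw [if_pos hc]
      have hb := PySem.Int.floordiv_two_mid_bounds (lo := lo + 1) (hi := hi - 1) (by omega)
      have he : lo + 1 + (hi - 1) = lo + hi := by ring
      rw [he] at hb
      by_cases hmid : pvSumMin ft (PySem.Int.floordiv (lo + hi) 2) ≤ K
      · rw [if_pos hmid]
        exact ih _ hi (by omega) hmid h2
      · rw [if_neg hmid]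
        exact ih lo _ (by omega) h1 (by omega)
    · rw [if_neg hc]
      have hhi : hi = lo + 1 := by omega
      exact ⟨h1, hhi ▸ h2⟩

theorem pvBsearch_cert (ft : List Int) (K : Int) :
    ∀ (n : Nat) (lo hi : Int), (hi - lo).toNat ≤ n →
    pvSumMin ft lo ≤ K → K < pvSumMin ft hi →
    pvSumMin ft (pvBsearch ft K lo hi) ≤ K ∧
      K < pvSumMin ft (pvBsearch ft K lo hi + 1) := by
  intro _ lo hi _ h1 h2
  exact pvBsearchGo_cert ft K (hi - lo).toNat lo hi le_rfl h1 h2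

-- enumerate(food_times) with 1-based second components, as the scan sees it
def pvEnumZ : List Int → Int → List (Int × Int)
  | [], _ => []
  | f :: r, i => (f, i + 1) :: pvEnumZ r (i + 1)

theorem pvEnumZ_zip : ∀ (ft : List Int) (i : Int),
    pvEnumZ ft i = ft.zip (PySem.List.pyRange (i + 1) (i + 1 + (ft.length : Int)) 1)
  | [], i => by simp [pvEnumZ]
  | f :: r, i => by
    rw [pvEnumZ, PySem.List.pyRange_one_cons (by push_cast [List.length_cons]; omega),
      List.zip_cons_cons, pvEnumZ_zip r (i + 1)]
    have he : i + 1 + ((f :: r).length : Int) = i + 1 + 1 + (r.length : Int) := by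
      push_cast [List.length_cons]; ring
    rw [he]

theorem pvEnumZ_snd_lt : ∀ (ft : List Int) (i : Int), ∀ p ∈ pvEnumZ ft i, i < p.2
  | [], _, p, hp => by simp [pvEnumZ] at hp
  | f :: r, i, p, hp => by
    rw [pvEnumZ] at hp
    rcases List.mem_cons.mp hp with rfl | hp
    · simp
    · have := pvEnumZ_snd_lt r (i + 1) p hp
      omega

theorem pvEnumZ_pairwise : ∀ (ft : List Int) (i : Int),
    (pvEnumZ ft i).Pairwise (fun a b => a.2 < b.2)
  | [], _ => by simp [pvEnumZ]
  | f :: r, i => by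
    rw [pvEnumZ, List.pairwise_cons]
    exact ⟨fun p hp => by have := pvEnumZ_snd_lt r (i + 1) p hp; simp; omega,
      pvEnumZ_pairwise r (i + 1)⟩

theorem pvEnumZ_filter_len (v : Int) : ∀ (ft : List Int) (i : Int),
    ((pvEnumZ ft i).filter (fun p => decide (v < p.1))).length =
      (ft.filter (fun f => decide (v < f))).length
  | [], _ => rfl
  | f :: r, i => by
    rw [pvEnumZ, List.filter_cons, List.filter_cons]
    by_cases hvf : v < f
    · simp only [hvf, decide_true, if_true, List.length_cons, pvEnumZ_filter_len v r (i + 1)]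
    · simp only [hvf, decide_false, Bool.false_eq_true, if_false]
      exact pvEnumZ_filter_len v r (i + 1)

theorem pvEnumZ_map_sum (g : Int → Int) : ∀ (ft : List Int) (i : Int),
    ((pvEnumZ ft i).map (fun p => g p.1)).sum = (ft.map g).sum
  | [], _ => rfl
  | f :: r, i => by
    rw [pvEnumZ, List.map_cons, List.sum_cons, List.map_cons, List.sum_cons,
      pvEnumZ_map_sum g r (i + 1)]

theorem scan_eq : ∀ (ft : List Int) (i v rem : Int),
    0 ≤ rem →
    rem < (((pvEnumZ ft i).filter (fun p => decide (v < p.1))).length : Int) →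
    pvScan ft i v rem =
      (PySem.List.pyGetD ((pvEnumZ ft i).filter (fun p => decide (v < p.1))) rem
        ((0 : Int), (0 : Int))).2
  | [], i, v, rem, h0, hlt => by simp [pvEnumZ] at hlt; omega
  | f :: r, i, v, rem, h0, hlt => by
    rw [pvScan]
    rw [pvEnumZ, List.filter_cons] at hlt ⊢
    by_cases hvf : v < f
    · simp only [hvf, decide_true, if_true] at hlt ⊢
      by_cases hrem : rem = 0
      · subst hrem
        rw [if_pos rfl]
        rw [show (0 : Int) = ((0 : Nat) : Int) from rfl, PySem.List.pyGetD_natCast]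
        rfl
      · rw [if_neg hrem]
        obtain ⟨nn, rfl⟩ : ∃ nn : Nat, rem = (nn : Int) := ⟨rem.toNat, by omega⟩
        obtain ⟨mm, rfl⟩ : ∃ mm : Nat, nn = mm + 1 := by
          cases nn with
          | zero => exact absurd rfl hrem
          | succ m => exact ⟨m, rfl⟩
        have hrec := scan_eq r (i + 1) v ((mm : Int)) (by omega) (by
          rw [List.length_cons] at hlt; push_cast at hlt ⊢; omega)
        have hcast : ((mm + 1 : Nat) : Int) - 1 = ((mm : Nat) : Int) := by push_cast; ring
        rw [hcast, hrec, PySem.List.pyGetD_natCast, PySem.List.pyGetD_natCast,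
          List.getD_cons_succ]
    · simp only [hvf, decide_false, Bool.false_eq_true, if_false] at hlt ⊢
      exact scan_eq r (i + 1) v rem h0 hlt

-- facts about the sorted pair list ys = sorted2(zip(food_times, 1..n))
theorem zs_snd_nodup (ft : List Int) :
    ((ft.zip (PySem.List.pyRange 1 ((ft.length : Int) + 1) 1)).map (fun p => p.2)).Nodup := by
  rw [← map_eq_zip, List.map_map]
  have hco : ((fun p : Int × Int => p.2) ∘ fun i => (PySem.List.pyGetD ft i 0, i + 1)) =
      fun i : Int => i + 1 := rfl
  rw [hco]
  exact (PySem.List.nodup_pyRange_one 0 (ft.length : Int)).map (fun a b hab => by omega)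

theorem ys_pairwise (ft : List Int) :
    (PySem.List.sorted2 (ft.zip (PySem.List.pyRange 1 ((ft.length : Int) + 1) 1))
      (fun x => x.1) (fun x => x.2) false).Pairwise (fun a b => pvLt a b = true) := by
  have hYZ := PySem.List.sorted2_perm
    (ft.zip (PySem.List.pyRange 1 ((ft.length : Int) + 1) 1)) (fun x => x.1) (fun x => x.2) false
  have hZnodup : (ft.zip (PySem.List.pyRange 1 ((ft.length : Int) + 1) 1)).Nodup :=
    (zs_snd_nodup ft).of_map
  have hYSp : (PySem.List.sorted2 (ft.zip (PySem.List.pyRange 1 ((ft.length : Int) + 1) 1))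
      (fun x => x.1) (fun x => x.2) false).Pairwise (fun a b => pvB b a = false) := by
    rw [sorted2_foldl]
    exact foldl_insertBy_pairwise pvB pvB_trans pvB_asym _ [] (by simp)
  have hYSnd : (PySem.List.sorted2 (ft.zip (PySem.List.pyRange 1 ((ft.length : Int) + 1) 1))
      (fun x => x.1) (fun x => x.2) false).Nodup := hYZ.nodup_iff.mpr hZnodup
  exact (hYSp.and hYSnd).imp (fun hab => pvB_compl_lt hab.1 hab.2)

-- A's heap computation equals the cursor loop over the sorted pair list
theorem solution_eq_cursor (ft : List Int) (K : Int) :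
    solution ft K = pvLoopB
      (PySem.List.sorted2 (ft.zip (PySem.List.pyRange 1 ((ft.length : Int) + 1) 1))
        (fun x => x.1) (fun x => x.2) false) 0 K := by
  unfold solution
  obtain ⟨hinv, hperm⟩ := foldl_push_ok (fun i => (PySem.List.pyGetD ft i 0, i + 1))
    (PySem.List.pyRange 0 (ft.length : Int) 1) [] (by intro i j hj _; simp at hj)
  rw [List.append_nil, map_eq_zip] at hperm
  have hYZ := PySem.List.sorted2_perm
    (ft.zip (PySem.List.pyRange 1 ((ft.length : Int) + 1) 1)) (fun x => x.1) (fun x => x.2) false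
  have hYSmap : ((PySem.List.sorted2 (ft.zip (PySem.List.pyRange 1 ((ft.length : Int) + 1) 1))
      (fun x => x.1) (fun x => x.2) false).map (fun p => p.2)).Nodup :=
    (hYZ.map _).nodup_iff.mpr (zs_snd_nodup ft)
  rw [pvLoopA]
  exact loopGo_eq (pvBuild ft).length (pvBuild ft) _ 0 K le_rfl hinv
    (hperm.trans hYZ.symm) (ys_pairwise ft) hYSmap

theorem solution_spec' (ft : List Int) (K : Int) : solution ft K = solution_alt ft K := by
  rw [solution_eq_cursor]
  simp only [solution_alt]
  by_cases hft : ft = []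
  · subst hft
    rfl
  · rw [if_neg (by simpa [List.isEmpty_iff] using hft)]
    have hperm_ys_zs : (PySem.List.sorted2
        (ft.zip (PySem.List.pyRange 1 ((ft.length : Int) + 1) 1))
        (fun x => x.1) (fun x => x.2) false).Perm
        (ft.zip (PySem.List.pyRange 1 ((ft.length : Int) + 1) 1)) :=
      PySem.List.sorted2_perm _ _ _ _
    have hEz : pvEnumZ ft 0 = ft.zip (PySem.List.pyRange 1 ((ft.length : Int) + 1) 1) := by
      rw [pvEnumZ_zip]
      ring_nf
    have hrel : ∀ v : Int, pvRel (PySem.List.sorted2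
        (ft.zip (PySem.List.pyRange 1 ((ft.length : Int) + 1) 1))
        (fun x => x.1) (fun x => x.2) false) 0 v = pvSumMin ft v := by
      intro v
      unfold pvRel pvSumMin
      calc ((PySem.List.sorted2 (ft.zip (PySem.List.pyRange 1 ((ft.length : Int) + 1) 1))
            (fun x => x.1) (fun x => x.2) false).map (fun p => min p.1 v - 0)).sum
          = ((ft.zip (PySem.List.pyRange 1 ((ft.length : Int) + 1) 1)).map
              (fun p => min p.1 v - 0)).sum := (hperm_ys_zs.map _).sum_eq
        _ = ((pvEnumZ ft 0).map (fun p => min p.1 v - 0)).sum := by rw [hEz]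
        _ = (ft.map (fun f => min f v - 0)).sum := pvEnumZ_map_sum (fun x => min x v - 0) ft 0
        _ = (ft.map (fun f => min f v)).sum := by simp
    have htot : ((PySem.List.sorted2 (ft.zip (PySem.List.pyRange 1 ((ft.length : Int) + 1) 1))
        (fun x => x.1) (fun x => x.2) false).map (fun p => p.1 - 0)).sum = ft.sum := by
      calc ((PySem.List.sorted2 (ft.zip (PySem.List.pyRange 1 ((ft.length : Int) + 1) 1))
            (fun x => x.1) (fun x => x.2) false).map (fun p => p.1 - 0)).sum
          = ((ft.zip (PySem.List.pyRange 1 ((ft.length : Int) + 1) 1)).map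
              (fun p => p.1 - 0)).sum := (hperm_ys_zs.map _).sum_eq
        _ = ((pvEnumZ ft 0).map (fun p => p.1 - 0)).sum := by rw [hEz]
        _ = (ft.map (fun f => f - 0)).sum := pvEnumZ_map_sum (fun x => x - 0) ft 0
        _ = ft.sum := by simp
    by_cases hK : K ≥ ft.sum
    · rw [if_pos hK]
      exact cursor_neg _ 0 K (ys_pairwise ft) (by rw [htot]; exact hK)
    · rw [if_neg hK]
      push_neg at hK
      obtain ⟨m, hm⟩ : ∃ m, PySem.List.min? ft (fun y => y) = some m := by
        cases h : PySem.List.min? ft (fun y => y) with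
        | none => exact absurd ((PySem.List.min?_eq_none_iff ft (fun y => y)).mp h) hft
        | some m => exact ⟨m, rfl⟩
      obtain ⟨M, hM⟩ : ∃ M, PySem.List.max? ft (fun y => y) = some M := by
        cases h : PySem.List.max? ft (fun y => y) with
        | none => exact absurd ((PySem.List.max?_eq_none_iff ft (fun y => y)).mp h) hft
        | some M => exact ⟨M, rfl⟩
      have hmin := PySem.List.min?_isMin hm
      have hmax := PySem.List.max?_isMax hM
      rw [hm, hM]
      simp only [Option.getD_some]
      have hn : (0 : Int) < (ft.length : Int) := by
        have := List.length_pos_of_ne_nil hft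
        omega
      have hlo : pvSumMin ft
          (min m (PySem.Int.floordiv K (ft.length : Int))) ≤ K := by
        rw [sumMin_const ft _ (fun f hf => le_trans (min_le_left _ _) (hmin f hf))]
        have hfd := PySem.Int.floordiv_mul_add_mod K (ft.length : Int)
        have hmn := PySem.Int.mod_nonneg (a := K) (b := (ft.length : Int)) hn
        have hle : min m (PySem.Int.floordiv K (ft.length : Int)) ≤
            PySem.Int.floordiv K (ft.length : Int) := min_le_right _ _
        nlinarith [mul_le_mul_of_nonneg_right hle (le_of_lt hn)]
      have hhi : K < pvSumMin ft M := by
        rw [sumMin_of_ge ft M (fun f hf => hmax f hf)]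
        exact hK
      obtain ⟨hc1, hc2⟩ := pvBsearch_cert ft K
        ((M - min m (PySem.Int.floordiv K (ft.length : Int))).toNat) _ M le_rfl hlo hhi
      rw [cursor_eq _ 0 K (pvBsearch ft K (min m (PySem.Int.floordiv K (ft.length : Int))) M)
        (ys_pairwise ft) (by rw [hrel]; exact hc1) (by rw [hrel]; exact hc2)]
      have hsorted : PySem.List.sorted
          ((PySem.List.sorted2 (ft.zip (PySem.List.pyRange 1 ((ft.length : Int) + 1) 1))
            (fun x => x.1) (fun x => x.2) false).filter
            (fun p => decide ((pvBsearch ft K (min m (PySem.Int.floordiv K (ft.length : Int))) M)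
              < p.1)))
          (fun x => x.2) false =
          (ft.zip (PySem.List.pyRange 1 ((ft.length : Int) + 1) 1)).filter
            (fun p => decide ((pvBsearch ft K (min m (PySem.Int.floordiv K (ft.length : Int))) M)
              < p.1)) := by
        refine PySem.List.sorted_eq_of_perm_of_pairwise_lt _ _ _ ?_ ?_
        · exact (hperm_ys_zs.symm.filter _).symm.symm
        · refine List.Pairwise.filter _ ?_
          rw [← hEz]
          exact pvEnumZ_pairwise ft 0
      rw [hsorted, hrel, ← hEz]
      refine (scan_eq ft 0 _ _ (by omega) ?_).symm
      rw [pvEnumZ_filter_len]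
      have hsucc := sumMin_succ ft
        (pvBsearch ft K (min m (PySem.Int.floordiv K (ft.length : Int))) M)
      omega

-- ===== VERDICT (by name: the statement is the Claim_ definition above) =====
theorem solution_spec : Claim_equal_solution := by
  intro ft K _
  exact solution_spec' ft K
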